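-- pv_equiv track=rewrite | github.com/hamidurrk/SpellChecker | check.py | genSubSet
-- ===== SOURCE A (Python) =====
-- def genSubSet(word_set):
--     sub_set = set()
--     for word in word_set:
--         sub_set.add(word)
--         for i in range(len(word)):
--             for j in range(len(word) - i + 1):
--                 if word[j:j+i] != '':
--                     sub_set.add(word[j:j+i])
--     return sub_set
-- ===== SOURCE B (Python) =====
-- def genSubSet(word_set):
--     sub_set = set()
--     for word in word_set:
--         sub_set.add(word)
--         windows = list(word)
--         for k in range(1, len(word) + 1):
--             sub_set.update(windows)
--             windows = [w + c for w, c in zip(windows, word[k:])]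
--     return sub_set
-- ===== Notes on version B (the rewrite author's own statement) =====
-- stated objective: alternative
-- what changed: B replaces A's length-indexed slicing loops (guarded word[j:j+i] for every i,j) with a sliding-window dynamic pass: it keeps the list of all windows of the current length and derives the next length by zipping each window with the shifted remainder of the word (w+c), so no slicing and no empty-string guard occur.
import Mathlib
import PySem

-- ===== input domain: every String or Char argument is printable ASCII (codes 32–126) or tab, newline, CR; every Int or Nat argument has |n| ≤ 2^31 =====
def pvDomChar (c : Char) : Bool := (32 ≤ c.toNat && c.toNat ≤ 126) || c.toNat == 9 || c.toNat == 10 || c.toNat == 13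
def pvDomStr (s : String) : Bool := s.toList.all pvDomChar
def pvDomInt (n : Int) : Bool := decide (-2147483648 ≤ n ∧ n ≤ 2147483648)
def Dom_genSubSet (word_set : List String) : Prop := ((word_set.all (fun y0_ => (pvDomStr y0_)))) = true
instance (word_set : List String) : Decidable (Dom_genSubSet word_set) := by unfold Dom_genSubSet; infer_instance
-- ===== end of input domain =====

-- B collects the same substrings by a sliding-window pass (the windows of length k, zipped with
-- the word shifted by k, give the windows of length k+1), replacing A's guarded slicing loops.

-- ===== PORT A =====
def genSubSet (word_set : List String) : List String :=
  word_set.foldl (fun sub_set word =>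
    (PySem.List.pyRange 0 (PySem.Str.len word) 1).foldl (fun s i =>
      (PySem.List.pyRange 0 (PySem.Str.len word - i + 1) 1).foldl (fun s j =>
        if PySem.Str.slice word (some j) (some (j + i)) ≠ "" then
          PySem.Set.add s (PySem.Str.slice word (some j) (some (j + i)))
        else s) s)
      (PySem.Set.add sub_set word)) []

-- ===== PORT B =====
def genSubSet_alt (word_set : List String) : List String :=
  word_set.foldl (fun sub_set word =>
    ((PySem.List.pyRange 1 (PySem.Str.len word + 1) 1).foldl
      (fun (st : PySem.Set String × List String) k =>
        (st.2.foldl PySem.Set.add st.1,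
         (st.2.zip (PySem.Str.slice word (some k) none).toList).map (fun wc => wc.1.push wc.2)))
      (PySem.Set.add sub_set word, word.toList.map (fun c => String.ofList [c]))).1) []

-- ===== PRECONDITION & SPEC =====
def Spec_genSubSet (word_set : List String) (out : List String) : Prop := out = genSubSet_alt word_set
instance (word_set : List String) (out : List String) : Decidable (Spec_genSubSet word_set out) := by unfold Spec_genSubSet; infer_instance

-- ===== CLAIM (what is proved, stated in full; the proofs are below) =====
def Claim_equal_genSubSet : Prop := ∀ (word_set : List String), Dom_genSubSet word_set → Spec_genSubSet word_set (genSubSet word_set)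

-- ===== LEMMAS AND PROOFS =====

-- the list of all windows (substrings) of length k of w, by start position
def winList (w : String) (k : Int) : List String :=
  (PySem.List.pyRange 0 ((w.toList.length : Int) - k + 1) 1).map
    (fun j => PySem.Str.slice w (some j) (some (j + k)))

theorem slice_self_nil {α : Type} (xs : List α) (j : Int) :
    PySem.List.slice xs (some j) (some j) = [] := by
  apply List.eq_nil_of_length_eq_zero
  rw [PySem.List.length_slice]; omega

theorem str_slice_self (w : String) (j : Int) :
    PySem.Str.slice w (some j) (some j) = "" := by
  refine String.toList_inj.mp ?_
  have h := slice_self_nil w.toList j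
  simp [h]

theorem slice_ne_nil {α : Type} (xs : List α) (i j : Int) (h1 : 1 ≤ i) (h0 : 0 ≤ j)
    (h2 : j + i ≤ (xs.length : Int)) : PySem.List.slice xs (some j) (some (j + i)) ≠ [] := by
  have c1 : PySem.List.clampIdx xs.length j = j.toNat := by
    simp only [PySem.List.clampIdx]; split_ifs <;> omega
  have c2 : PySem.List.clampIdx xs.length (j + i) = (j + i).toNat := by
    simp only [PySem.List.clampIdx]; split_ifs <;> omega
  intro hnil
  have hl := PySem.List.length_slice xs j (j + i)
  rw [hnil, c1, c2] at hl
  simp at hl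
  omega

theorem str_slice_ne_empty (w : String) (i j : Int) (h1 : 1 ≤ i) (h0 : 0 ≤ j)
    (h2 : j + i ≤ (w.toList.length : Int)) :
    PySem.Str.slice w (some j) (some (j + i)) ≠ "" := by
  have h := slice_ne_nil w.toList i j h1 h0 h2
  intro he
  have ht : (PySem.Str.slice w (some j) (some (j + i))).toList = [] := by rw [he]; simp
  simp at ht
  exact h ht

-- single-character slice
theorem slice_one (w : String) (j : Nat) (hj : j < w.toList.length) :
    PySem.Str.slice w (some (j : Int)) (some ((j : Int) + 1)) = String.ofList [w.toList[j]] := by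
  refine String.toList_inj.mp ?_
  have h1 : ((j:Int) + 1) = ((j:Int) + ((1:Nat):Int)) := by push_cast; ring
  rw [PySem.Str.toList_slice, PySem.Chars.slice_eq_listSlice, h1,
    PySem.List.slice_natCast_add, List.drop_eq_getElem_cons hj,
    List.take_succ_cons, List.take_zero]
  simp

-- initial windows: the single characters
theorem winList_one (w : String) :
    w.toList.map (fun c => String.ofList [c]) = winList w 1 := by
  unfold winList
  have h : (w.toList.length : Int) - 1 + 1 = ((w.toList.length : Nat) : Int) := by omega
  rw [h, PySem.List.pyRange_zero_natCast, List.map_map]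
  apply List.ext_getElem (by simp)
  intro i h1 h2
  simp only [List.getElem_map, List.getElem_range, Function.comp]
  rw [slice_one w i (by simpa using h2)]

-- the windows of length k, each extended by the next character, are the windows of length k+1
theorem winList_step (w : String) (k : Nat) (h2 : k ≤ w.toList.length) :
    ((winList w (k : Int)).zip (PySem.Str.slice w (some (k : Int)) none).toList).map
        (fun wc => wc.1.push wc.2)
      = winList w ((k : Int) + 1) := by
  unfold winList
  have e1 : (w.toList.length : Int) - (k : Int) + 1 = ((w.toList.length - k + 1 : Nat) : Int) := by
    omega
  have e2 : (w.toList.length : Int) - ((k : Int) + 1) + 1 = ((w.toList.length - k : Nat) : Int) := by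
    omega
  rw [e1, e2, PySem.List.pyRange_zero_natCast, PySem.List.pyRange_zero_natCast,
    PySem.Str.toList_slice, PySem.Chars.slice_eq_listSlice, PySem.List.slice_from_natCast,
    List.map_map, List.map_map]
  apply List.ext_getElem
  · simp only [List.length_map, List.length_zip, List.length_range, List.length_drop]; omega
  · intro i hL hR
    have hi : i < w.toList.length - k := by
      simp only [List.length_map, List.length_range] at hR; exact hR
    simp only [List.getElem_map, List.getElem_zip, List.getElem_range, Function.comp,
      List.getElem_drop]
    refine String.toList_inj.mp ?_
    rw [String.toList_push]
    have c2 : ((i:Int) + ((k:Int) + 1)) = ((i:Int) + ((k+1:Nat):Int)) := by push_cast; ring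
    rw [PySem.Str.toList_slice, PySem.Str.toList_slice, PySem.Chars.slice_eq_listSlice,
      PySem.Chars.slice_eq_listSlice, c2, PySem.List.slice_natCast_add,
      PySem.List.slice_natCast_add, List.take_add_one]
    have hk : k < (w.toList.drop i).length := by simp only [List.length_drop]; omega
    rw [List.getElem?_eq_getElem hk, List.getElem_drop]
    simp [Nat.add_comm]

-- A's inner j-loop at level i is an unguarded fold of adds over winList w i
theorem levelA (w : String) (i : Int) (h1 : 1 ≤ i) (s : List String) :
    (PySem.List.pyRange 0 ((w.toList.length : Int) - i + 1) 1).foldl (fun s j =>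
        if PySem.Str.slice w (some j) (some (j + i)) ≠ "" then
          PySem.Set.add s (PySem.Str.slice w (some j) (some (j + i)))
        else s) s
      = (winList w i).foldl PySem.Set.add s := by
  unfold winList
  rw [List.foldl_map]
  refine PySem.List.foldl_congr_mem _ _ _ _ ?_
  intro acc j hj
  rw [PySem.List.mem_pyRange_one] at hj
  rw [if_pos (str_slice_ne_empty w i j h1 (by omega) (by omega))]

theorem mem_foldl_levels (w : String) (y : String) (l : List Int) (s : List String)
    (h : y ∈ s) : y ∈ l.foldl (fun s k => (winList w k).foldl PySem.Set.add s) s := by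
  induction l generalizing s with
  | nil => exact h
  | cons k t ih =>
    refine ih _ ?_
    exact (PySem.Set.mem_foldl_add (winList w k) id s y).mpr (Or.inl h)

-- B's state fold: the snd component tracks winList, the fst folds the levels
theorem bState (w : String) (m : Nat) : ∀ (a : Int) (s : List String), 1 ≤ a →
    a + (m : Int) = (w.toList.length : Int) + 1 →
    (PySem.List.pyRange a ((w.toList.length : Int) + 1) 1).foldl
      (fun (st : PySem.Set String × List String) k =>
        (st.2.foldl PySem.Set.add st.1,
         (st.2.zip (PySem.Str.slice w (some k) none).toList).map (fun wc => wc.1.push wc.2)))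
      (s, winList w a)
    = ((PySem.List.pyRange a ((w.toList.length : Int) + 1) 1).foldl
        (fun s k => (winList w k).foldl PySem.Set.add s) s,
       winList w ((w.toList.length : Int) + 1)) := by
  induction m with
  | zero =>
    intro a s h1 h2
    rw [PySem.List.pyRange_one_eq_nil (by omega)]
    simp only [List.foldl_nil]
    rw [show a = (w.toList.length : Int) + 1 by omega]
  | succ m ih =>
    intro a s h1 h2
    rw [PySem.List.pyRange_one_cons (by omega)]
    simp only [List.foldl_cons]
    have hk : a = ((a.toNat : Nat) : Int) := by omega
    have hstep : ((winList w a).zip (PySem.Str.slice w (some a) none).toList).map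
        (fun wc => wc.1.push wc.2) = winList w (a + 1) := by
      rw [hk]
      exact winList_step w a.toNat (by omega)
    rw [hstep]
    exact ih (a + 1) _ (by omega) (by omega)

theorem winList_full (w : String) :
    winList w ((w.toList.length : Nat) : Int) = [w] := by
  unfold winList
  rw [show (w.toList.length : Int) - (w.toList.length : Nat) + 1 = ((1:Nat):Int) by omega,
    PySem.List.pyRange_zero_natCast]
  simp only [List.range_one, List.map_cons, List.map_nil]
  congr 1
  refine String.toList_inj.mp ?_
  rw [PySem.Str.toList_slice, PySem.Chars.slice_eq_listSlice]
  push_cast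
  simp only [zero_add, PySem.List.slice_zero_start]
  rw [PySem.List.slice_to _ (by omega)]
  simp

theorem body_eq (w : String) (s : List String) :
    (PySem.List.pyRange 0 (PySem.Str.len w) 1).foldl (fun s i =>
      (PySem.List.pyRange 0 (PySem.Str.len w - i + 1) 1).foldl (fun s j =>
        if PySem.Str.slice w (some j) (some (j + i)) ≠ "" then
          PySem.Set.add s (PySem.Str.slice w (some j) (some (j + i)))
        else s) s) (PySem.Set.add s w)
    = ((PySem.List.pyRange 1 (PySem.Str.len w + 1) 1).foldl
        (fun (st : PySem.Set String × List String) k =>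
          (st.2.foldl PySem.Set.add st.1,
           (st.2.zip (PySem.Str.slice w (some k) none).toList).map (fun wc => wc.1.push wc.2)))
        (PySem.Set.add s w, w.toList.map (fun c => String.ofList [c]))).1 := by
  have hlen : PySem.Str.len w = ((w.toList.length : Nat) : Int) := by
    simp [PySem.Str.len_eq]
  rw [hlen]
  rcases Nat.eq_zero_or_pos w.toList.length with h0 | hpos
  · rw [h0]
    rw [PySem.List.pyRange_one_eq_nil (by omega), PySem.List.pyRange_one_eq_nil (by omega)]
    rfl
  · -- RHS: the state fold collapses to a fold of the levels 1..n, then level n adds only w itself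
    rw [winList_one w, bState w w.toList.length 1 _ (by omega) (by omega)]
    rw [PySem.List.pyRange_one_succ_right (by exact_mod_cast hpos), List.foldl_append,
      List.foldl_cons, List.foldl_nil, winList_full w]
    -- LHS: peel off the i = 0 level, which is the identity
    rw [PySem.List.pyRange_one_cons (by exact_mod_cast hpos)]
    simp only [List.foldl_cons, zero_add]
    have hzero : (PySem.List.pyRange 0 ((w.toList.length : Int) - 0 + 1) 1).foldl
        (fun t j => if PySem.Str.slice w (some j) (some (j + (0:Int))) ≠ "" then
            PySem.Set.add t (PySem.Str.slice w (some j) (some (j + 0))) else t)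
        (PySem.Set.add s w) = PySem.Set.add s w := by
      rw [PySem.List.foldl_congr_mem _ _ (fun t _ => t) _ ?_, PySem.List.foldl_ignore]
      intro t j _
      simp [str_slice_self w j]
    rw [hzero]
    rw [PySem.List.foldl_congr_mem _ _
      (fun t i => (winList w i).foldl PySem.Set.add t) _ ?_]
    · refine (PySem.Set.add_of_mem ?_).symm
      exact mem_foldl_levels w w _ _ ((PySem.Set.mem_add _ _ _).mpr (Or.inr rfl))
    · intro t i hi
      rw [PySem.List.mem_pyRange_one] at hi
      exact levelA w i (by omega) t

-- ===== VERDICT (by name: the statement is the Claim_ definition above) =====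
theorem genSubSet_spec : Claim_equal_genSubSet := by
  intro ws _
  unfold Spec_genSubSet genSubSet genSubSet_alt
  exact PySem.List.foldl_congr_mem _ _ _ _ (fun s w _ => body_eq w s)
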